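-- pv_equiv track=rewrite | github.com/Puneh222/securin_assign | part_b.py | find_dice_combinations
-- ===== SOURCE A (Python) =====
-- def find_dice_combinations(start_value, limit):
--     """Generates all possible 6-sided dice combinations."""
--
--     combinations = []
--     def helper(current, temp):
--         if len(temp) == 6:
--             combinations.append(temp)
--             return
--         for i in range(current, limit + 1):
--             helper(i, temp + [i])
--     helper(start_value, [])
--     return combinations
-- ===== SOURCE B (Python) =====
-- def find_dice_combinations(start_value, limit):
--     """Generates all possible 6-sided dice combinations."""
--     states = [(start_value, [])]
--     for _ in range(6):
--         states = [(i, combo + [i])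
--                   for (last, combo) in states
--                   for i in range(last, limit + 1)]
--     return [combo for (_, combo) in states]
-- ===== Notes on version B (the rewrite author's own statement) =====
-- stated objective: alternative
-- what changed: Replaces the nested recursive DFS helper with an iterative level-by-level (frontier) expansion: six rounds of a flat comprehension extend every (last, combo) state by each value in range(last, limit+1), producing the same lexicographic order.
import Mathlib
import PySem

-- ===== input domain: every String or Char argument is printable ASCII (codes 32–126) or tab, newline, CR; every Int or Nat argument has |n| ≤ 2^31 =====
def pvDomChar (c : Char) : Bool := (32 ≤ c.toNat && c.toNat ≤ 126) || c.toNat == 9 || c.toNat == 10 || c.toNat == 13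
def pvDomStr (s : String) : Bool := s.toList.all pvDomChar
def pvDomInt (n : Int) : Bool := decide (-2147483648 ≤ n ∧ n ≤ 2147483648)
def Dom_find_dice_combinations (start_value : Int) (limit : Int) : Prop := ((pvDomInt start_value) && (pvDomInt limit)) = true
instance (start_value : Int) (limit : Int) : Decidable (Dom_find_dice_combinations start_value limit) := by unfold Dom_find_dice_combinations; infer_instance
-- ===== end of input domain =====

-- B replaces A's recursive DFS helper by an iterative level-by-level frontier expansion (same output, same order); alternative structure, no speed claim.


-- ===== PORT A =====
-- A's inner recursive helper; recursion in Python terminates because temp grows,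
-- here the fuel argument (6 - temp.length, supplied as 6 at the top call) makes
-- the same computation total; the fuel-exhausted branch is never reached.
def pvHelperA (limit : Int) : Nat → Int → List Int → List (List Int)
  | fuel, current, temp =>
    if temp.length == 6 then [temp]
    else
      match fuel with
      | 0 => []
      | f + 1 =>
        (PySem.List.pyRange current (limit + 1) 1).foldl
          (fun acc i => acc ++ pvHelperA limit f i (temp ++ [i])) []

def find_dice_combinations (start_value : Int) (limit : Int) : List (List Int) :=
  pvHelperA limit 6 start_value []

-- ===== PORT B =====
-- one round of Source B's loop body: the flat comprehension over the current states
def pvStepB (limit : Int) (states : List (Int × List Int)) : List (Int × List Int) :=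
  states.flatMap (fun p => (PySem.List.pyRange p.1 (limit + 1) 1).map (fun i => (i, p.2 ++ [i])))

-- 'for _ in range(6): states = …'
def pvRoundsB (limit : Int) : Nat → List (Int × List Int) → List (Int × List Int)
  | 0, states => states
  | n + 1, states => pvRoundsB limit n (pvStepB limit states)

def find_dice_combinations_alt (start_value : Int) (limit : Int) : List (List Int) :=
  (pvRoundsB limit 6 [(start_value, [])]).map Prod.snd

-- ===== PRECONDITION & SPEC =====
def Spec_find_dice_combinations (start_value : Int) (limit : Int) (out : List (List Int)) : Prop := out = find_dice_combinations_alt start_value limit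
instance (start_value : Int) (limit : Int) (out : List (List Int)) : Decidable (Spec_find_dice_combinations start_value limit out) := by unfold Spec_find_dice_combinations; infer_instance

-- ===== CLAIM (what is proved, stated in full; the proofs are below) =====
def Claim_equal_find_dice_combinations : Prop := ∀ (start_value : Int) (limit : Int), Dom_find_dice_combinations start_value limit → Spec_find_dice_combinations start_value limit (find_dice_combinations start_value limit)

-- ===== LEMMAS AND PROOFS =====

-- the frontier expansion distributes over the state list
theorem pvRoundsB_flat (limit : Int) (f : Nat) (xs : List (Int × List Int)) :
    pvRoundsB limit f xs = xs.flatMap (fun p => pvRoundsB limit f [p]) := by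
  induction f generalizing xs with
  | zero => simp [pvRoundsB]
  | succ f ih =>
    have hstep : pvStepB limit xs = xs.flatMap (fun p => pvStepB limit [p]) := by
      simp [pvStepB]
    rw [pvRoundsB, hstep, ih]
    rw [List.flatMap_assoc]
    refine List.flatMap_congr ?_
    intro p _
    rw [← ih]
    rfl

-- DFS helper with fuel f on a length-(6 - f) prefix equals f frontier rounds from that single state
theorem pvHelperA_eq_rounds (limit : Int) (f : Nat) (current : Int) (temp : List Int)
    (h : temp.length + f = 6) :
    pvHelperA limit f current temp = (pvRoundsB limit f [(current, temp)]).map Prod.snd := by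
  induction f generalizing current temp with
  | zero =>
    have h6 : temp.length = 6 := by omega
    simp [pvHelperA, pvRoundsB, h6]
  | succ f ih =>
    have hne : ¬ temp.length == 6 := by simp; omega
    rw [pvHelperA]
    simp only [hne, Bool.false_eq_true, if_false]
    rw [PySem.List.foldl_append_eq_flatMap, List.nil_append]
    rw [pvRoundsB]
    have hstep : pvStepB limit [(current, temp)]
        = (PySem.List.pyRange current (limit + 1) 1).map (fun i => (i, temp ++ [i])) := by
      simp [pvStepB]
    rw [hstep, pvRoundsB_flat, List.flatMap_map, List.map_flatMap]
    refine List.flatMap_congr ?_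
    intro i _
    exact ih i (temp ++ [i]) (by simp; omega)

-- ===== VERDICT (by name: the statement is the Claim_ definition above) =====
theorem find_dice_combinations_spec : Claim_equal_find_dice_combinations := by
  intro s l _
  unfold Spec_find_dice_combinations find_dice_combinations find_dice_combinations_alt
  exact pvHelperA_eq_rounds l 6 s [] (by simp)
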